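-- pv_equiv track=rewrite | github.com/Senticor-ai/project | agents/tool_executor.py | _normalize_option_aliases
-- ===== SOURCE A (Python) =====
-- def _normalize_option_aliases(argv: list[str]) -> list[str]:
--     alias_map = {
--         "--project-id": "--project",
--         "--action-id": "--action",
--     }
--     normalized: list[str] = []
--     for arg in argv:
--         replacement = None
--         for alias, canonical in alias_map.items():
--             if arg == alias:
--                 replacement = canonical
--                 break
--             alias_prefix = f"{alias}="
--             if arg.startswith(alias_prefix):
--                 replacement = f"{canonical}={arg[len(alias_prefix):]}"
--                 break
--         normalized.append(replacement if replacement is not None else arg)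
--     return normalized
-- ===== SOURCE B (Python) =====
-- def _normalize_option_aliases(argv: list[str]) -> list[str]:
--     alias_map = {
--         "--project-id": "--project",
--         "--action-id": "--action",
--     }
--     def rewrite(arg: str) -> str:
--         key, sep, value = arg.partition("=")
--         canonical = alias_map.get(key)
--         return f"{canonical}{sep}{value}" if canonical is not None else arg
--     return [rewrite(arg) for arg in argv]
-- ===== Notes on version B (the rewrite author's own statement) =====
-- stated objective: simpler
-- what changed: Instead of scanning the alias map per argument with exact-match and startswith-prefix checks, B parses each argument once with partition('=') and does a single direct dict lookup of the key, rebuilding canonical+sep+value.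
import Mathlib
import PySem

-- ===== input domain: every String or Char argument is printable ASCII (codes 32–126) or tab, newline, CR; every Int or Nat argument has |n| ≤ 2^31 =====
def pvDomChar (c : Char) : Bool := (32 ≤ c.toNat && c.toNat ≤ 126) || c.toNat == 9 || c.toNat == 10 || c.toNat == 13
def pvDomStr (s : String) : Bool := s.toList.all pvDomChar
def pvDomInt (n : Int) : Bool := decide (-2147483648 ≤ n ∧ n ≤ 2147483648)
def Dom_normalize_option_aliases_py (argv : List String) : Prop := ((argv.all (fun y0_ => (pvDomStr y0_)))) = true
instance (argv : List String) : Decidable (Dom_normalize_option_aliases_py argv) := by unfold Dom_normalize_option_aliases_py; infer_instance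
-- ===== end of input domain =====

-- B replaces A's per-argument scan of the alias map (exact match + startswith prefix check)
-- by a single partition('=') parse and one direct alias-map lookup (objective: simpler).

-- ===== PORT A =====
-- alias_map = {"--project-id": "--project", "--action-id": "--action"} (insertion order)
def pvAliasMap : List (List Char × List Char) :=
  [("--project-id".toList, "--project".toList), ("--action-id".toList, "--action".toList)]

-- inner 'for alias, canonical in alias_map.items(): … break' loop, returning 'replacement'
def pvFindRepl : List (List Char × List Char) → List Char → Option (List Char)
  | [], _ => none
  | (al, canonical) :: rest, arg =>
    if arg = al then some canonical
    else
      -- alias_prefix = f"{alias}="; arg.startswith(alias_prefix); arg[len(alias_prefix):]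
      if PySem.Chars.startswith arg (al ++ ['=']) then
        some (canonical ++ ['='] ++ PySem.List.slice arg (some ((al ++ ['=']).length : Int)) none)
      else pvFindRepl rest arg

def normalize_option_aliases_py (argv : List String) : List String :=
  argv.foldl
    (fun normalized arg =>
      normalized ++ [String.ofList ((pvFindRepl pvAliasMap arg.toList).getD arg.toList)]) []

-- ===== PORT B =====
-- key, sep, value = arg.partition("=")  (split at the FIRST '='; exact hand port of str.partition)
def pvPartitionEq (cs : List Char) : List Char × List Char × List Char :=
  match cs.dropWhile (· ≠ '=') with
  | [] => (cs.takeWhile (· ≠ '='), [], [])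
  | _ :: t => (cs.takeWhile (· ≠ '='), ['='], t)

-- rewrite(arg): alias_map.get(key) = first-match lookup in the association list
def pvRewriteGen (m : List (List Char × List Char)) (arg : List Char) : List Char :=
  let p := pvPartitionEq arg
  match m.lookup p.1 with
  | some canonical => canonical ++ p.2.1 ++ p.2.2
  | none => arg

def normalize_option_aliases_py_alt (argv : List String) : List String :=
  argv.map (fun arg => String.ofList (pvRewriteGen pvAliasMap arg.toList))

-- ===== PRECONDITION & SPEC =====
def Spec_normalize_option_aliases_py (argv : List String) (out : List String) : Prop := out = normalize_option_aliases_py_alt argv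
instance (argv : List String) (out : List String) : Decidable (Spec_normalize_option_aliases_py argv out) := by unfold Spec_normalize_option_aliases_py; infer_instance

-- ===== CLAIM (what is proved, stated in full; the proofs are below) =====
def Claim_equal_normalize_option_aliases_py : Prop := ∀ (argv : List String), Dom_normalize_option_aliases_py argv → Spec_normalize_option_aliases_py argv (normalize_option_aliases_py argv)

-- ===== LEMMAS AND PROOFS =====

-- takeWhile/dropWhile of a ++ '='::t when '=' ∉ a
theorem pv_takeWhile_eq_marker {a t : List Char} (ha : '=' ∉ a) :
    (a ++ '=' :: t).takeWhile (· ≠ '=') = a := by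
  induction a with
  | nil => simp
  | cons x xs ih =>
    simp only [List.mem_cons, not_or] at ha
    rw [List.cons_append, List.takeWhile_cons_of_pos (by simpa using Ne.symm ha.1), ih ha.2]

-- the per-argument equivalence, generalized over any alias map with '='-free aliases
theorem pv_elem_eq (m : List (List Char × List Char))
    (hm : ∀ p ∈ m, '=' ∉ p.1) (cs : List Char) :
    (pvFindRepl m cs).getD cs = pvRewriteGen m cs := by
  induction m with
  | nil => simp [pvFindRepl, pvRewriteGen]
  | cons p rest ih =>
    obtain ⟨a, c⟩ := p
    have ha : '=' ∉ a := hm ⟨a, c⟩ (by simp)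
    have hrest : ∀ q ∈ rest, '=' ∉ q.1 := fun q hq => hm q (by simp [hq])
    have ihr := ih hrest
    rcases hdw : cs.dropWhile (· ≠ '=') with _ | ⟨h, t⟩
    · -- no '=' in cs: key = cs, sep = value = ""
      have hnocs : '=' ∉ cs := by
        intro hmem
        have := List.dropWhile_eq_nil_iff.mp hdw '=' hmem
        simp at this
      have htw : cs.takeWhile (· ≠ '=') = cs := by
        apply List.takeWhile_eq_self_iff.mpr
        intro x hx
        simp only [decide_eq_true_eq]
        exact fun h => hnocs (h ▸ hx)
      have hpart : pvPartitionEq cs = (cs, [], []) := by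
        unfold pvPartitionEq; rw [hdw, htw]
      have hnopre : PySem.Chars.startswith cs (a ++ ['=']) = false := by
        apply Bool.eq_false_iff.mpr
        intro hsw
        obtain ⟨s, hs⟩ := (PySem.Chars.startswith_iff _ _).mp hsw
        exact hnocs (by rw [← hs]; simp)
      by_cases hca : cs = a
      · rw [pvRewriteGen, hpart]
        simp [pvFindRepl, hca, List.lookup]
      · rw [pvRewriteGen, hpart]
        simp only [pvFindRepl, if_neg hca, hnopre, Bool.false_eq_true, if_false,
          List.lookup, beq_eq_false_iff_ne.mpr hca]
        rw [ihr, pvRewriteGen, hpart]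
    · -- cs = key ++ '='::t with '=' ∉ key
      have hh : h = '=' := by
        have := List.head?_dropWhile_not (fun x => x ≠ '=') cs
        rw [hdw] at this
        simpa using this
      subst hh
      have hcs : cs = cs.takeWhile (· ≠ '=') ++ '=' :: t := by
        conv_lhs => rw [← List.takeWhile_append_dropWhile (p := (· ≠ '=')) (l := cs)]
        rw [hdw]
      have hkey : '=' ∉ cs.takeWhile (· ≠ '=') := by
        intro hmem
        have := List.mem_takeWhile_imp hmem
        simp at this
      have hmemcs : '=' ∈ cs := by rw [hcs]; simp
      have hpart : pvPartitionEq cs = (cs.takeWhile (· ≠ '='), ['='], t) := by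
        unfold pvPartitionEq; rw [hdw]
      by_cases hk : cs.takeWhile (· ≠ '=') = a
      · -- key matches this alias: A takes the startswith branch, B the lookup hit
        have hne : cs ≠ a := fun hca => ha (hca ▸ hmemcs)
        have hsw : PySem.Chars.startswith cs (a ++ ['=']) = true := by
          apply (PySem.Chars.startswith_iff _ _).mpr
          exact ⟨t, by rw [hcs, hk]; simp⟩
        have hdrop : PySem.List.slice cs (some (((a ++ ['=']).length : Nat) : Int)) none = t := by
          rw [PySem.List.slice_from_natCast, hcs, hk]
          simp [List.drop_append]
        rw [pvRewriteGen, hpart]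
        simp only [pvFindRepl, if_neg hne, hsw, if_true, Option.getD_some,
          List.lookup, beq_iff_eq.mpr hk, hdrop]
      · -- key does not match: both fall through to the rest of the map
        have hne : cs ≠ a := by
          intro hca
          apply hk
          rw [hca, List.takeWhile_eq_self_iff.mpr]
          intro x hx
          simp only [decide_eq_true_eq]
          exact fun h => ha (h ▸ hx)
        have hnopre : PySem.Chars.startswith cs (a ++ ['=']) = false := by
          apply Bool.eq_false_iff.mpr
          intro hsw
          obtain ⟨s, hs⟩ := (PySem.Chars.startswith_iff _ _).mp hsw
          apply hk
          rw [← hs]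
          simpa using pv_takeWhile_eq_marker (t := s) ha
        rw [pvRewriteGen, hpart]
        simp only [pvFindRepl, if_neg hne, hnopre, Bool.false_eq_true, if_false,
          List.lookup, beq_eq_false_iff_ne.mpr hk]
        rw [ihr, pvRewriteGen, hpart]

-- ===== VERDICT (by name: the statement is the Claim_ definition above) =====
theorem normalize_option_aliases_py_spec : Claim_equal_normalize_option_aliases_py := by
  intro argv _
  unfold Spec_normalize_option_aliases_py normalize_option_aliases_py normalize_option_aliases_py_alt
  rw [PySem.List.foldl_append_singleton_eq_map]
  apply List.map_congr_left
  intro arg _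
  have hm : ∀ p ∈ pvAliasMap, '=' ∉ p.1 := by decide
  rw [pv_elem_eq pvAliasMap hm arg.toList]
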